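-- pv_equiv track=rewrite | github.com/git-of-neo/python | z_algo_suffix.py | z_algo_suffix
-- ===== SOURCE A (Python) =====
-- def z_score_suffix(index , string, start = None):
--     k = start if start!=None else len(string)-1
--     while index >=0 and string[k] == string[index]:
--         index-=1
--         k-=1
--     return len(string)-k-1
--
-- def z_algo_suffix(string):
--     z_array = [0]*len(string)
--     z_array[-1] = len(string)
--
--     L = len(string)
--     R = len(string)
--
--     for i in range(len(string)-2, -1, -1):
--         # outside box
--         if i < L:
--             z_array[i] = z_score_suffix(i, string)
--             L = i-z_array[i]+1
--             R = i
--
--         # inside box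
--         else:
--             remaining = i-L+1
--             k = len(string)-1-(R-i)
--
--             if z_array[k] < remaining:
--                 z_array[i] = z_array[k]
--
--             elif z_array[k] > remaining:
--                 z_array[i] = remaining
--
--             else:
--                 z_array[i] = z_score_suffix(L-1, string, start = len(string) -1 - z_array[k])
--                 if z_array[i]>0:
--                     L = i-z_array[i]+1
--                     R = i
--                 else:
--                     L = len(string)
--                     R = len(string)
--
--     return z_array
-- ===== SOURCE B (Python) =====
-- def z_algo_suffix(string):
--     # Naive direct definition: z[i] = length of the longest common suffix of
--     # string[:i+1] and string, by explicit backward comparison.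
--     n = len(string)
--     result = []
--     for i in range(n):
--         j = 0
--         while j <= i and string[i - j] == string[n - 1 - j]:
--             j += 1
--         result.append(j)
--     return result
-- ===== Notes on version B (the rewrite author's own statement) =====
-- stated objective: simpler
-- what changed: A's suffix Z-algorithm with an [L,R] mirror box and value copying is replaced by the naive definition: for each i, count matching characters of string[:i+1] against string backwards by direct comparison.
import Mathlib
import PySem

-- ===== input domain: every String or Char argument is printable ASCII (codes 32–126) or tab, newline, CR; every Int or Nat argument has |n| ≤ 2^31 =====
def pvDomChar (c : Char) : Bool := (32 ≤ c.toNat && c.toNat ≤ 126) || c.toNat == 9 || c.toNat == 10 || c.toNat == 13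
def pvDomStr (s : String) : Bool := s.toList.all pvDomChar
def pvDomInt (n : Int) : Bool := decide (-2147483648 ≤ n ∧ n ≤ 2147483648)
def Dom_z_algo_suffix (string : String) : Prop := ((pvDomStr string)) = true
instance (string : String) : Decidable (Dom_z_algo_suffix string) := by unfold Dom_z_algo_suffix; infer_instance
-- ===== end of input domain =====

-- B replaces A's suffix Z-algorithm ([L,R]-box with mirror copying) by the naive
-- quadratic definition of the suffix Z-array (objective: simpler); on "" A raises
-- IndexError while B returns [] (excluded by Pre_ below).

-- ===== PORT A =====
-- 'while index >= 0 and string[k] == string[index]' of z_score_suffix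
-- (the isSome guard only totalises the comparison: within Pre_ both indices are in range)
def zScoreLoop (cs : List Char) (index k : Int) : Int :=
  if h : 0 ≤ index ∧ PySem.List.pyGet? cs k = PySem.List.pyGet? cs index
         ∧ (PySem.List.pyGet? cs k).isSome then
    zScoreLoop cs (index - 1) (k - 1)
  else (cs.length : Int) - k - 1
termination_by (index + 1).toNat
decreasing_by
  rw [Int.sub_add_cancel]
  exact (Int.toNat_lt_toNat (Int.lt_add_one_iff.mpr h.1)).mpr (Int.lt_add_one_iff.mpr le_rfl)

def zScoreSuffix (index : Int) (cs : List Char) (start : Option Int) : Int :=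
  let k := start.getD ((cs.length : Int) - 1)
  zScoreLoop cs index k

-- the 'for i in range(len(string)-2, -1, -1)' loop, state (z_array, L, R)
def aLoop (cs : List Char) (i : Int) (arr : List Int) (L R : Int) : List Int :=
  if hi : i < 0 then arr
  else
    let n : Int := cs.length
    if i < L then
      -- outside box
      let z := zScoreSuffix i cs none
      aLoop cs (i - 1) (PySem.List.pySetD arr i z) (i - z + 1) i
    else
      -- inside box
      let remaining := i - L + 1
      let k := n - 1 - (R - i)
      let zk := PySem.List.pyGetD arr k 0   -- z_array[k]; in range within Pre_
      if zk < remaining then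
        aLoop cs (i - 1) (PySem.List.pySetD arr i zk) L R
      else if zk > remaining then
        aLoop cs (i - 1) (PySem.List.pySetD arr i remaining) L R
      else
        let z := zScoreSuffix (L - 1) cs (some (n - 1 - zk))
        if z > 0 then
          aLoop cs (i - 1) (PySem.List.pySetD arr i z) (i - z + 1) i
        else
          aLoop cs (i - 1) (PySem.List.pySetD arr i z) n n
termination_by (i + 1).toNat
decreasing_by all_goals
  rw [Int.sub_add_cancel]
  exact (Int.toNat_lt_toNat (Int.lt_add_one_iff.mpr (Int.not_lt.mp hi))).mpr
    (Int.lt_add_one_iff.mpr le_rfl)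

def z_algo_suffix (string : String) : List Int :=
  let cs := string.toList
  let n : Int := cs.length
  let arr0 := List.replicate cs.length (0 : Int)
  let arr1 := PySem.List.pySetD arr0 (-1) n   -- z_array[-1] = len(string); IndexError on "" (outside Pre_)
  aLoop cs (n - 2) arr1 n n

-- ===== PORT B =====
-- 'while j <= i and string[i-j] == string[n-1-j]' (isSome guard only totalises)
def naiveLoop (cs : List Char) (i j : Int) : Int :=
  if h : j ≤ i ∧ PySem.List.pyGet? cs (i - j) = PySem.List.pyGet? cs ((cs.length : Int) - 1 - j)
         ∧ (PySem.List.pyGet? cs (i - j)).isSome then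
    naiveLoop cs i (j + 1)
  else j
termination_by (i - j + 1).toNat
decreasing_by
  have e : i - (j + 1) + 1 = i - j := by ring
  rw [e]
  exact (Int.toNat_lt_toNat (Int.lt_add_one_iff.mpr (Int.sub_nonneg.mpr h.1))).mpr
    (Int.lt_add_one_iff.mpr le_rfl)

def z_algo_suffix_alt (string : String) : List Int :=
  let cs := string.toList
  (PySem.List.pyRange 0 (cs.length : Int) 1).map (fun i => naiveLoop cs i 0)

-- ===== PRECONDITION & SPEC =====
-- Pre_ excludes only the empty string, on which A raises IndexError (z_array[-1] on []).
def Pre_z_algo_suffix (string : String) : Prop := string ≠ ""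
instance (string : String) : Decidable (Pre_z_algo_suffix string) := by
  unfold Pre_z_algo_suffix; infer_instance

def pvWitness_z_algo_suffix : String := "abcab"

def Spec_z_algo_suffix (string : String) (out : List Int) : Prop := out = z_algo_suffix_alt string
instance (string : String) (out : List Int) : Decidable (Spec_z_algo_suffix string out) := by
  unfold Spec_z_algo_suffix; infer_instance

-- ===== CLAIM (what is proved, stated in full; the proofs are below) =====
def Claim_equal_z_algo_suffix : Prop := ∀ (string : String), Dom_z_algo_suffix string → Pre_z_algo_suffix string → Spec_z_algo_suffix string (z_algo_suffix string)

-- ===== LEMMAS AND PROOFS =====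

-- the downward match-length both loops compute: number of s = 0,1,… with
-- cs[a-s] = cs[b-s], stopping at a-s < 0, a mismatch, or an out-of-range read
def matchLen (cs : List Char) (a b : Int) : Int :=
  if h : 0 ≤ a ∧ PySem.List.pyGet? cs a = PySem.List.pyGet? cs b
         ∧ (PySem.List.pyGet? cs a).isSome then
    matchLen cs (a - 1) (b - 1) + 1
  else 0
termination_by (a + 1).toNat
decreasing_by
  rw [Int.sub_add_cancel]
  exact (Int.toNat_lt_toNat (Int.lt_add_one_iff.mpr h.1)).mpr (Int.lt_add_one_iff.mpr le_rfl)

def Ok (cs : List Char) (a b s : Int) : Prop :=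
  0 ≤ a - s ∧ PySem.List.pyGet? cs (a - s) = PySem.List.pyGet? cs (b - s)
    ∧ (PySem.List.pyGet? cs (a - s)).isSome

lemma Ok_shift (cs : List Char) (a b s : Int) : Ok cs (a - 1) (b - 1) (s - 1) ↔ Ok cs a b s := by
  unfold Ok
  have h1 : a - 1 - (s - 1) = a - s := by ring
  have h2 : b - 1 - (s - 1) = b - s := by ring
  rw [h1, h2]

lemma matchLen_nonneg (cs : List Char) (a b : Int) : 0 ≤ matchLen cs a b := by
  fun_induction matchLen with
  | case1 a b h ih => omega
  | case2 a b h => omega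

lemma matchLen_le (cs : List Char) (a b : Int) (ha : -1 ≤ a) : matchLen cs a b ≤ a + 1 := by
  fun_induction matchLen with
  | case1 a b h ih => have := ih (by omega); omega
  | case2 a b h => omega

lemma ok_of_lt_matchLen (cs : List Char) (a b s : Int) (h0 : 0 ≤ s)
    (h : s < matchLen cs a b) : Ok cs a b s := by
  fun_induction matchLen generalizing s with
  | case1 a b hc ih =>
    rcases eq_or_lt_of_le h0 with h0' | h0'
    · subst h0'
      simpa [Ok] using hc
    · rw [← Ok_shift]
      exact ih (s - 1) (by omega) (by omega)
  | case2 a b hc => omega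

lemma not_ok_matchLen (cs : List Char) (a b : Int) : ¬ Ok cs a b (matchLen cs a b) := by
  fun_induction matchLen with
  | case1 a b h ih =>
    rw [← Ok_shift]
    simpa using ih
  | case2 a b h =>
    simpa [Ok] using h

lemma matchLen_eq_of (cs : List Char) (a b t : Int) (ht : 0 ≤ t)
    (hok : ∀ s, 0 ≤ s → s < t → Ok cs a b s) (hnot : ¬ Ok cs a b t) :
    matchLen cs a b = t := by
  rcases lt_trichotomy (matchLen cs a b) t with hlt | he | hgt
  · exact absurd (hok _ (matchLen_nonneg cs a b) hlt) (not_ok_matchLen cs a b)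
  · exact he
  · exact absurd (ok_of_lt_matchLen cs a b t ht hgt) hnot

lemma matchLen_split (cs : List Char) (a b t : Int) (ht : 0 ≤ t)
    (hok : ∀ s, 0 ≤ s → s < t → Ok cs a b s) :
    matchLen cs a b = t + matchLen cs (a - t) (b - t) := by
  obtain ⟨m, rfl⟩ : ∃ m : Nat, t = (m : Int) := ⟨t.toNat, by omega⟩
  clear ht
  induction m generalizing a b with
  | zero => simp
  | succ m ih =>
    have hc : Ok cs a b 0 := hok 0 le_rfl (by push_cast; omega)
    have h1 : matchLen cs a b = matchLen cs (a - 1) (b - 1) + 1 := by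
      rw [matchLen]
      rw [dif_pos (by simpa [Ok] using hc)]
    have h2 := ih (a - 1) (b - 1) (by
      intro s hs hlt
      have h3 := hok (s + 1) (by omega) (by push_cast; omega)
      have h4 := (Ok_shift cs a b (s + 1)).mpr h3
      simpa using h4)
    rw [h1, h2]
    have e1 : a - 1 - (m : Int) = a - ((m : Int) + 1) := by ring
    have e2 : b - 1 - (m : Int) = b - ((m : Int) + 1) := by ring
    rw [e1, e2]
    push_cast
    ring

lemma matchLen_self (cs : List Char) (a : Int) (h0 : 0 ≤ a) (h1 : a < (cs.length : Int)) :
    matchLen cs a a = a + 1 := by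
  have hsome : ∀ x : Int, 0 ≤ x → x < (cs.length : Int) → (PySem.List.pyGet? cs x).isSome = true := by
    intro x hx0 hx1
    rw [PySem.List.pyGet?_eq_some_getElem cs hx0 hx1]
    rfl
  obtain ⟨m, rfl⟩ : ∃ m : Nat, a = (m : Int) := ⟨a.toNat, by omega⟩
  clear h0
  induction m with
  | zero =>
    rw [matchLen, dif_pos ⟨by simp, rfl, hsome 0 (by simp) (by simpa using h1)⟩]
    rw [matchLen, dif_neg (by simp)]
    simp
  | succ m ih =>
    have hm : (m : Int) < (cs.length : Int) := by push_cast at h1 ⊢; omega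
    have hstep : matchLen cs ((m + 1 : Nat) : Int) ((m + 1 : Nat) : Int)
        = matchLen cs (((m + 1 : Nat) : Int) - 1) (((m + 1 : Nat) : Int) - 1) + 1 := by
      rw [matchLen, dif_pos ⟨by push_cast; omega, rfl, hsome _ (by push_cast; omega) h1⟩]
    have e : ((m + 1 : Nat) : Int) - 1 = (m : Int) := by push_cast; ring
    rw [hstep, e, ih hm]
    push_cast
    ring

lemma zScoreLoop_eq (cs : List Char) (index k : Int) :
    zScoreLoop cs index k = (cs.length : Int) - 1 - k + matchLen cs index k := by
  fun_induction zScoreLoop with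
  | case1 index k hc ih =>
    have hc2 : 0 ≤ index ∧ PySem.List.pyGet? cs index = PySem.List.pyGet? cs k
        ∧ (PySem.List.pyGet? cs index).isSome := ⟨hc.1, hc.2.1.symm, hc.2.1 ▸ hc.2.2⟩
    have hstep : matchLen cs index k = matchLen cs (index - 1) (k - 1) + 1 := by
      rw [matchLen, dif_pos hc2]
    rw [ih, hstep]
    ring
  | case2 index k hc =>
    have hc2 : ¬ (0 ≤ index ∧ PySem.List.pyGet? cs index = PySem.List.pyGet? cs k
        ∧ (PySem.List.pyGet? cs index).isSome) := by
      rintro ⟨x, y, z⟩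
      exact hc ⟨x, y.symm, y ▸ z⟩
    rw [matchLen, dif_neg hc2]
    ring

lemma naiveLoop_eq (cs : List Char) (i j : Int) :
    naiveLoop cs i j = j + matchLen cs (i - j) ((cs.length : Int) - 1 - j) := by
  fun_induction naiveLoop with
  | case1 j hc ih =>
    have hstep : matchLen cs (i - j) ((cs.length : Int) - 1 - j)
        = matchLen cs (i - j - 1) ((cs.length : Int) - 1 - j - 1) + 1 := by
      rw [matchLen, dif_pos ⟨by omega, hc.2.1, hc.2.2⟩]
    have e1 : i - (j + 1) = i - j - 1 := by ring
    have e2 : (cs.length : Int) - 1 - (j + 1) = (cs.length : Int) - 1 - j - 1 := by ring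
    rw [ih, hstep, e1, e2]
    ring
  | case2 j hc =>
    have hc2 : ¬ (0 ≤ i - j ∧ PySem.List.pyGet? cs (i - j) = PySem.List.pyGet? cs ((cs.length : Int) - 1 - j)
        ∧ (PySem.List.pyGet? cs (i - j)).isSome) := by
      rintro ⟨x, y, z⟩
      exact hc ⟨by omega, y, z⟩
    rw [matchLen, dif_neg hc2]
    ring

-- the suffix-Z value of position i
def zs (cs : List Char) (i : Int) : Int := matchLen cs i ((cs.length : Int) - 1)

-- transfer inside the box: positions [L, R] mirror the suffix of the same length
lemma key_iff (cs : List Char) (L R i s : Int) (hL : 0 ≤ L) (_hLi : L ≤ i) (hiR : i < R)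
    (hR : R ≤ (cs.length : Int) - 1) (hbox : zs cs R = R - L + 1)
    (h0 : 0 ≤ s) (hs : s ≤ i - L) :
    (Ok cs i ((cs.length : Int) - 1) s ↔ Ok cs (cs.length - 1 - (R - i)) ((cs.length : Int) - 1) s) := by
  unfold zs at hbox
  have hget : PySem.List.pyGet? cs (i - s) = PySem.List.pyGet? cs ((cs.length : Int) - 1 - (R - i) - s) := by
    have ht := ok_of_lt_matchLen cs R ((cs.length : Int) - 1) (R - i + s) (by omega) (by omega)
    obtain ⟨_, h2, _⟩ := ht
    have e1 : R - (R - i + s) = i - s := by ring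
    have e2 : (cs.length : Int) - 1 - (R - i + s) = (cs.length : Int) - 1 - (R - i) - s := by ring
    rw [e1, e2] at h2
    exact h2
  unfold Ok
  constructor
  · rintro ⟨h1, h2, h3⟩
    exact ⟨by omega, by rw [← hget]; exact h2, by rw [← hget]; exact h3⟩
  · rintro ⟨h1, h2, h3⟩
    exact ⟨by omega, by rw [hget]; exact h2, by rw [hget]; exact h3⟩

lemma M1 (cs : List Char) (L R i : Int) (hL : 0 ≤ L) (hLi : L ≤ i) (hiR : i < R)
    (hR : R ≤ (cs.length : Int) - 1) (hbox : zs cs R = R - L + 1)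
    (hlt : zs cs ((cs.length : Int) - 1 - (R - i)) < i - L + 1) :
    zs cs i = zs cs ((cs.length : Int) - 1 - (R - i)) := by
  have hzk0 := matchLen_nonneg cs ((cs.length : Int) - 1 - (R - i)) ((cs.length : Int) - 1)
  unfold zs at hlt hzk0 ⊢
  apply matchLen_eq_of cs i ((cs.length : Int) - 1) _ hzk0
  · intro s hs0 hs1
    exact (key_iff cs L R i s hL hLi hiR hR hbox hs0 (by omega)).mpr
      (ok_of_lt_matchLen cs _ _ s hs0 hs1)
  · intro hOk
    exact not_ok_matchLen cs _ _
      ((key_iff cs L R i _ hL hLi hiR hR hbox hzk0 (by omega)).mp hOk)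

lemma M2 (cs : List Char) (L R i : Int) (hL : 0 ≤ L) (hLi : L ≤ i) (hiR : i < R)
    (hR : R ≤ (cs.length : Int) - 1) (hbox : zs cs R = R - L + 1)
    (hgt : zs cs ((cs.length : Int) - 1 - (R - i)) > i - L + 1) :
    zs cs i = i - L + 1 := by
  unfold zs at hgt ⊢
  apply matchLen_eq_of cs i ((cs.length : Int) - 1) _ (by omega)
  · intro s hs0 hs1
    exact (key_iff cs L R i s hL hLi hiR hR hbox hs0 (by omega)).mpr
      (ok_of_lt_matchLen cs _ _ s hs0 (by omega))
  · rintro ⟨h1, h2, h3⟩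
    have hOkk := ok_of_lt_matchLen cs ((cs.length : Int) - 1 - (R - i)) ((cs.length : Int) - 1)
      (i - L + 1) (by omega) (by omega)
    obtain ⟨_, hk2, _⟩ := hOkk
    have hnb := not_ok_matchLen cs R ((cs.length : Int) - 1)
    unfold zs at hbox
    rw [hbox] at hnb
    apply hnb
    have e1 : R - (R - L + 1) = L - 1 := by ring
    have e2 : i - (i - L + 1) = L - 1 := by ring
    have e3 : (cs.length : Int) - 1 - (R - i) - (i - L + 1) = (cs.length : Int) - 1 - (R - L + 1) := by ring
    rw [e2] at h2 h3
    rw [e3] at hk2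
    unfold Ok
    rw [e1]
    exact ⟨by omega, by rw [hk2]; exact h2, h3⟩

lemma M3 (cs : List Char) (L R i : Int) (hL : 0 ≤ L) (hLi : L ≤ i) (hiR : i < R)
    (hR : R ≤ (cs.length : Int) - 1) (hbox : zs cs R = R - L + 1)
    (heq : zs cs ((cs.length : Int) - 1 - (R - i)) = i - L + 1) :
    zs cs i = (i - L + 1) + matchLen cs (L - 1) ((cs.length : Int) - 1 - (i - L + 1)) := by
  unfold zs at ⊢
  have hsplit := matchLen_split cs i ((cs.length : Int) - 1) (i - L + 1) (by omega) (by
    intro s hs0 hs1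
    exact (key_iff cs L R i s hL hLi hiR hR hbox hs0 (by omega)).mpr
      (ok_of_lt_matchLen cs _ _ s hs0 (by unfold zs at heq; omega)))
  have e1 : i - (i - L + 1) = L - 1 := by ring
  rw [e1] at hsplit
  exact hsplit

-- indexed update lemma for the Int-indexed pyGetD/pySetD we use
lemma pyGetD_pySetD_int (arr : List Int) (i j v : Int) (hi0 : 0 ≤ i)
    (hi : i < (arr.length : Int)) (hj0 : 0 ≤ j) (hj : j < (arr.length : Int)) :
    PySem.List.pyGetD (PySem.List.pySetD arr i v) j 0 =
      if j = i then v else PySem.List.pyGetD arr j 0 := by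
  rw [PySem.List.pySetD_of_nonneg arr v hi0]
  rw [PySem.List.pyGetD_eq_getElem _ 0 hj0 (by simpa using hj),
      PySem.List.pyGetD_eq_getElem _ 0 hj0 hj]
  rw [List.getElem_set]
  by_cases h : j = i
  · subst h
    simp
  · rw [if_neg (by omega), if_neg h]

lemma zScoreSuffix_none (i : Int) (cs : List Char) :
    zScoreSuffix i cs none = zs cs i := by
  unfold zScoreSuffix zs
  simp only [Option.getD_none]
  rw [zScoreLoop_eq]
  ring

lemma zScoreSuffix_some (a s0 : Int) (cs : List Char) :
    zScoreSuffix a cs (some s0) = (cs.length : Int) - 1 - s0 + matchLen cs a s0 := by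
  unfold zScoreSuffix
  simp only [Option.getD_some]
  rw [zScoreLoop_eq]

lemma pySetD_neg_one {α : Type} (xs : List α) (v : α) (h : xs ≠ []) :
    PySem.List.pySetD xs (-1) v = xs.set (xs.length - 1) v := by
  have hl : 0 < xs.length := List.length_pos_iff.mpr h
  unfold PySem.List.pySetD PySem.List.pySet? PySem.List.pyIdx?
  rw [if_neg (by omega), if_pos (by omega)]
  rfl

lemma alt_eq (s : String) :
    z_algo_suffix_alt s =
      (PySem.List.pyRange 0 (s.toList.length : Int) 1).map (fun i => zs s.toList i) := by
  unfold z_algo_suffix_alt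
  simp only []
  have hf : (fun i => naiveLoop s.toList i 0) = fun i => zs s.toList i := by
    funext i
    rw [naiveLoop_eq]
    unfold zs
    norm_num
  rw [hf]

-- loop invariant of A's main loop
def ALoopInv (cs : List Char) (i : Int) (arr : List Int) (L R : Int) : Prop :=
  arr.length = cs.length ∧
  (∀ j : Int, i < j → j < (cs.length : Int) → PySem.List.pyGetD arr j 0 = zs cs j) ∧
  ((L = (cs.length : Int) ∧ R = (cs.length : Int)) ∨
   (0 ≤ L ∧ i < R ∧ R ≤ (cs.length : Int) - 2 ∧ zs cs R = R - L + 1))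

lemma aLoop_spec (cs : List Char) (i : Int) (arr : List Int) (L R : Int)
    (hi : i ≤ (cs.length : Int) - 2) (hinv : ALoopInv cs i arr L R) :
    (aLoop cs i arr L R).length = arr.length ∧
    (∀ j : Int, 0 ≤ j → j < (cs.length : Int) →
      PySem.List.pyGetD (aLoop cs i arr L R) j 0 = zs cs j) := by
  revert hi hinv
  induction i, arr, L, R using aLoop.induct cs with
  | case1 i arr L R h =>
    intro hi hinv
    rw [aLoop, dif_pos h]
    exact ⟨rfl, fun j hj0 hjn => hinv.2.1 j (by omega) hjn⟩
  | case2 i arr L R h0 hiL z ih =>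
    have hzd : z = zScoreSuffix i cs none := rfl
    simp only [hzd] at ih
    intro hi hinv
    obtain ⟨hlen, hent, hbox⟩ := hinv
    rw [aLoop, dif_neg h0]
    simp only []
    rw [if_pos hiL]
    have hz : zScoreSuffix i cs none = zs cs i := zScoreSuffix_none i cs
    have hzle : zs cs i ≤ i + 1 := matchLen_le cs i _ (by omega)
    have hz0 : 0 ≤ zs cs i := matchLen_nonneg cs i _
    have hinv' : ALoopInv cs (i - 1) (PySem.List.pySetD arr i (zScoreSuffix i cs none))
        (i - zScoreSuffix i cs none + 1) i := by
      refine ⟨by rw [PySem.List.length_pySetD]; exact hlen, ?_, ?_⟩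
      · intro j hj1 hj2
        rw [pyGetD_pySetD_int arr i j _ (by omega) (by omega) (by omega) (by omega)]
        by_cases hji : j = i
        · rw [if_pos hji, hz, hji]
        · rw [if_neg hji]
          exact hent j (by omega) hj2
      · right
        rw [hz]
        exact ⟨by omega, by omega, by omega, by ring⟩
    obtain ⟨ih1, ih2⟩ := ih (by omega) hinv'
    exact ⟨by rw [ih1, PySem.List.length_pySetD], ih2⟩
  | case3 i arr L R h0 n hiL rem k zk hlt ih =>
    have hnd : n = (cs.length : Int) := rfl
    have hremd : rem = i - L + 1 := rfl
    have hkd : k = n - 1 - (R - i) := rfl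
    have hzkd : zk = PySem.List.pyGetD arr k 0 := rfl
    simp only [hnd, hremd, hkd, hzkd] at hlt ih
    intro hi hinv
    obtain ⟨hlen, hent, hbox⟩ := hinv
    rcases hbox with ⟨hLn, hRn⟩ | ⟨hL0, hiR, hRn2, hb⟩
    · exfalso; omega
    rw [aLoop, dif_neg h0]
    simp only []
    rw [if_neg hiL, if_pos hlt]
    have hkval : PySem.List.pyGetD arr ((cs.length : Int) - 1 - (R - i)) 0 = zs cs ((cs.length : Int) - 1 - (R - i)) := hent _ (by omega) (by omega)
    rw [hkval] at hlt
    have hzi : zs cs i = zs cs ((cs.length : Int) - 1 - (R - i)) :=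
      M1 cs L R i hL0 (by omega) hiR (by omega) hb hlt
    have hinv' : ALoopInv cs (i - 1) (PySem.List.pySetD arr i (PySem.List.pyGetD arr ((cs.length : Int) - 1 - (R - i)) 0)) L R := by
      refine ⟨by rw [PySem.List.length_pySetD]; exact hlen, ?_, ?_⟩
      · intro j hj1 hj2
        rw [pyGetD_pySetD_int arr i j _ (by omega) (by omega) (by omega) (by omega)]
        by_cases hji : j = i
        · rw [if_pos hji, hkval, hji]
          exact hzi.symm
        · rw [if_neg hji]
          exact hent j (by omega) hj2
      · exact Or.inr ⟨hL0, by omega, hRn2, hb⟩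
    obtain ⟨ih1, ih2⟩ := ih (by omega) hinv'
    exact ⟨by rw [ih1, PySem.List.length_pySetD], ih2⟩
  | case4 i arr L R h0 n hiL rem k zk hnlt hgt ih =>
    have hnd : n = (cs.length : Int) := rfl
    have hremd : rem = i - L + 1 := rfl
    have hkd : k = n - 1 - (R - i) := rfl
    have hzkd : zk = PySem.List.pyGetD arr k 0 := rfl
    simp only [hnd, hremd, hkd, hzkd] at hnlt hgt ih
    intro hi hinv
    obtain ⟨hlen, hent, hbox⟩ := hinv
    rcases hbox with ⟨hLn, hRn⟩ | ⟨hL0, hiR, hRn2, hb⟩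
    · exfalso; omega
    rw [aLoop, dif_neg h0]
    simp only []
    rw [if_neg hiL, if_neg hnlt, if_pos hgt]
    have hkval : PySem.List.pyGetD arr ((cs.length : Int) - 1 - (R - i)) 0 = zs cs ((cs.length : Int) - 1 - (R - i)) := hent _ (by omega) (by omega)
    rw [hkval] at hgt
    have hzi : zs cs i = i - L + 1 :=
      M2 cs L R i hL0 (by omega) hiR (by omega) hb hgt
    have hinv' : ALoopInv cs (i - 1) (PySem.List.pySetD arr i (i - L + 1)) L R := by
      refine ⟨by rw [PySem.List.length_pySetD]; exact hlen, ?_, ?_⟩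
      · intro j hj1 hj2
        rw [pyGetD_pySetD_int arr i j _ (by omega) (by omega) (by omega) (by omega)]
        by_cases hji : j = i
        · rw [if_pos hji, hji]
          exact hzi.symm
        · rw [if_neg hji]
          exact hent j (by omega) hj2
      · exact Or.inr ⟨hL0, by omega, hRn2, hb⟩
    obtain ⟨ih1, ih2⟩ := ih (by omega) hinv'
    exact ⟨by rw [ih1, PySem.List.length_pySetD], ih2⟩
  | case5 i arr L R h0 n hiL rem k zk hnlt hngt z hzpos ih =>
    have hnd : n = (cs.length : Int) := rfl
    have hremd : rem = i - L + 1 := rfl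
    have hkd : k = n - 1 - (R - i) := rfl
    have hzkd : zk = PySem.List.pyGetD arr k 0 := rfl
    have hzd : z = zScoreSuffix (L - 1) cs (some (n - 1 - zk)) := rfl
    simp only [hzd, hnd, hremd, hkd, hzkd] at hnlt hngt hzpos ih
    intro hi hinv
    obtain ⟨hlen, hent, hbox⟩ := hinv
    rcases hbox with ⟨hLn, hRn⟩ | ⟨hL0, hiR, hRn2, hb⟩
    · exfalso; omega
    rw [aLoop, dif_neg h0]
    simp only []
    rw [if_neg hiL, if_neg hnlt, if_neg hngt, if_pos hzpos]
    have hkval : PySem.List.pyGetD arr ((cs.length : Int) - 1 - (R - i)) 0 = zs cs ((cs.length : Int) - 1 - (R - i)) := hent _ (by omega) (by omega)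
    have heqv : zs cs ((cs.length : Int) - 1 - (R - i)) = i - L + 1 := by omega
    have hz : zScoreSuffix (L - 1) cs (some ((cs.length : Int) - 1 - PySem.List.pyGetD arr ((cs.length : Int) - 1 - (R - i)) 0)) = zs cs i := by
      rw [hkval, heqv, zScoreSuffix_some,
        M3 cs L R i hL0 (by omega) hiR (by omega) hb heqv]
      ring
    have hzle : zs cs i ≤ i + 1 := matchLen_le cs i _ (by omega)
    have hinv' : ALoopInv cs (i - 1)
        (PySem.List.pySetD arr i (zScoreSuffix (L - 1) cs (some ((cs.length : Int) - 1 - PySem.List.pyGetD arr ((cs.length : Int) - 1 - (R - i)) 0))))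
        (i - zScoreSuffix (L - 1) cs (some ((cs.length : Int) - 1 - PySem.List.pyGetD arr ((cs.length : Int) - 1 - (R - i)) 0)) + 1) i := by
      refine ⟨by rw [PySem.List.length_pySetD]; exact hlen, ?_, ?_⟩
      · intro j hj1 hj2
        rw [pyGetD_pySetD_int arr i j _ (by omega) (by omega) (by omega) (by omega)]
        by_cases hji : j = i
        · rw [if_pos hji, hz, hji]
        · rw [if_neg hji]
          exact hent j (by omega) hj2
      · right
        rw [hz]
        exact ⟨by omega, by omega, by omega, by ring⟩
    obtain ⟨ih1, ih2⟩ := ih (by omega) hinv'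
    exact ⟨by rw [ih1, PySem.List.length_pySetD], ih2⟩
  | case6 i arr L R h0 n hiL rem k zk hnlt hngt z hzneg ih =>
    have hnd : n = (cs.length : Int) := rfl
    have hremd : rem = i - L + 1 := rfl
    have hkd : k = n - 1 - (R - i) := rfl
    have hzkd : zk = PySem.List.pyGetD arr k 0 := rfl
    have hzd : z = zScoreSuffix (L - 1) cs (some (n - 1 - zk)) := rfl
    simp only [hzd, hnd, hremd, hkd, hzkd] at hnlt hngt hzneg ih
    intro hi hinv
    obtain ⟨hlen, hent, hbox⟩ := hinv
    rcases hbox with ⟨hLn, hRn⟩ | ⟨hL0, hiR, hRn2, hb⟩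
    · exfalso; omega
    rw [aLoop, dif_neg h0]
    simp only []
    rw [if_neg hiL, if_neg hnlt, if_neg hngt, if_neg hzneg]
    have hkval : PySem.List.pyGetD arr ((cs.length : Int) - 1 - (R - i)) 0 = zs cs ((cs.length : Int) - 1 - (R - i)) := hent _ (by omega) (by omega)
    have heqv : zs cs ((cs.length : Int) - 1 - (R - i)) = i - L + 1 := by omega
    have hz : zScoreSuffix (L - 1) cs (some ((cs.length : Int) - 1 - PySem.List.pyGetD arr ((cs.length : Int) - 1 - (R - i)) 0)) = zs cs i := by
      rw [hkval, heqv, zScoreSuffix_some,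
        M3 cs L R i hL0 (by omega) hiR (by omega) hb heqv]
      ring
    have hinv' : ALoopInv cs (i - 1)
        (PySem.List.pySetD arr i (zScoreSuffix (L - 1) cs (some ((cs.length : Int) - 1 - PySem.List.pyGetD arr ((cs.length : Int) - 1 - (R - i)) 0))))
        (cs.length : Int) (cs.length : Int) := by
      refine ⟨by rw [PySem.List.length_pySetD]; exact hlen, ?_, ?_⟩
      · intro j hj1 hj2
        rw [pyGetD_pySetD_int arr i j _ (by omega) (by omega) (by omega) (by omega)]
        by_cases hji : j = i
        · rw [if_pos hji, hz, hji]
        · rw [if_neg hji]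
          exact hent j (by omega) hj2
      · exact Or.inl ⟨rfl, rfl⟩
    obtain ⟨ih1, ih2⟩ := ih (by omega) hinv'
    exact ⟨by rw [ih1, PySem.List.length_pySetD], ih2⟩

-- ===== VERDICT (by name: the statement is the Claim_ definition above) =====
theorem z_algo_suffix_spec : Claim_equal_z_algo_suffix := by
  intro s _ hpre
  unfold Spec_z_algo_suffix z_algo_suffix
  simp only []
  have hpre' : s ≠ "" := hpre
  have hne : s.toList ≠ [] := by simp [hpre']
  have hn1 : 0 < s.toList.length := List.length_pos_iff.mpr hne
  have harr1 : PySem.List.pySetD (List.replicate s.toList.length (0 : Int)) (-1) (s.toList.length : Int)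
      = (List.replicate s.toList.length (0 : Int)).set (s.toList.length - 1) (s.toList.length : Int) := by
    have h := pySetD_neg_one (List.replicate s.toList.length (0 : Int)) ((s.toList.length : Int))
      (by simp; omega)
    simpa using h
  have hinv0 : ALoopInv s.toList ((s.toList.length : Int) - 2)
      (PySem.List.pySetD (List.replicate s.toList.length (0 : Int)) (-1) (s.toList.length : Int))
      (s.toList.length : Int) (s.toList.length : Int) := by
    refine ⟨by rw [PySem.List.length_pySetD, List.length_replicate], ?_, Or.inl ⟨rfl, rfl⟩⟩
    intro j hj1 hj2
    have hj : j = (s.toList.length : Int) - 1 := by omega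
    subst hj
    rw [harr1, PySem.List.pyGetD_eq_getElem _ 0 (by omega) (by simp)]
    rw [List.getElem_set, if_pos (by omega)]
    unfold zs
    rw [matchLen_self s.toList ((s.toList.length : Int) - 1) (by omega) (by omega)]
    ring
  obtain ⟨hAlen, hAent⟩ := aLoop_spec s.toList ((s.toList.length : Int) - 2) _ _ _ (by omega) hinv0
  rw [alt_eq]
  apply List.ext_getElem
  · rw [hAlen, PySem.List.length_pySetD, List.length_replicate, List.length_map,
      PySem.List.length_pyRange_one]
    omega
  · intro m h1 h2
    have hmlt : m < s.toList.length := by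
      rw [hAlen, PySem.List.length_pySetD, List.length_replicate] at h1
      exact h1
    have hA := hAent (m : Int) (by omega) (by omega)
    rw [PySem.List.pyGetD_eq_getElem _ 0 (by omega) (by omega)] at hA
    simp only [Int.toNat_natCast] at hA
    rw [hA, List.getElem_map, PySem.List.getElem_pyRange_one]
    simp
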